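-- pv_equiv track=rewrite | github.com/minseop-byeon/route_webapp | app.py | route_distance_with_return
-- ===== SOURCE A (Python) =====
-- def route_distance_with_return(order, dist_matrix):
--     if not order:
--         return 0
--     total = dist_matrix[0][order[0]]
--     for i in range(len(order) - 1):
--         total += dist_matrix[order[i]][order[i + 1]]
--     total += dist_matrix[order[-1]][0]
--     return total
-- ===== SOURCE B (Python) =====
-- def route_distance_with_return(order, dist_matrix):
--     if not order:
--         return 0
--     route = [0] + list(order) + [0]
--
--     def seg(i, j):
--         # total hop distance along route[i..j] (j > i), by splitting the leg in half
--         if j - i == 1: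
--             return dist_matrix[route[i]][route[j]]
--         m = (i + j) // 2
--         return seg(i, m) + seg(m, j)
--
--     return seg(0, len(route) - 1)
-- ===== Notes on version B (the rewrite author's own statement) =====
-- stated objective: alternative
-- what changed: B computes the closed-tour length by divide and conquer: it recursively splits the tour route=[0]+order+[0] at the midpoint and adds the two halves' distances (O(log n) recursion depth), instead of A's sequential accumulator pass with special first and return hops.
import Mathlib
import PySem

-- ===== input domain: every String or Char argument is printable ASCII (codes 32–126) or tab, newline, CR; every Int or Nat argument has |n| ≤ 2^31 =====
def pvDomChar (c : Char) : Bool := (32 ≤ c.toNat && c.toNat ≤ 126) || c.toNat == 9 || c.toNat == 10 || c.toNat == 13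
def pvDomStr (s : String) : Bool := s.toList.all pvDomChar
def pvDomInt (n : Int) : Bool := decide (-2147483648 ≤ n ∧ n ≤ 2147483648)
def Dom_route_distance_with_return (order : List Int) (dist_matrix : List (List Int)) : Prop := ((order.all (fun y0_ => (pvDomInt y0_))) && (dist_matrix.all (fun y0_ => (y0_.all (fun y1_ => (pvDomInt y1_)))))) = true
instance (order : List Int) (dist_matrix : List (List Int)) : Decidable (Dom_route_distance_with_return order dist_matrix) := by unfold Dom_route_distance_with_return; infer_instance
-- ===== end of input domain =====

-- B computes the closed-tour length by divide and conquer on the route [0]+order+[0]: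
-- each leg's distance is the sum of its two halves' distances, instead of A's sequential
-- accumulator pass with a special first hop and return hop.

-- ===== PORT A =====
-- A: first hop dist_matrix[0][order[0]], then an index loop over range(len(order)-1), then the return hop.
def route_distance_with_return (order : List Int) (dist_matrix : List (List Int)) : Int :=
  if order = [] then 0
  else
    let total : Int := PySem.List.pyGetD (PySem.List.pyGetD dist_matrix 0 []) (PySem.List.pyGetD order 0 0) 0
    let total := (PySem.List.pyRange 0 ((order.length : Int) - 1) 1).foldl
      (fun t i => t + PySem.List.pyGetD (PySem.List.pyGetD dist_matrix (PySem.List.pyGetD order i 0) []) (PySem.List.pyGetD order (i + 1) 0) 0) total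
    total + PySem.List.pyGetD (PySem.List.pyGetD dist_matrix (PySem.List.pyGetD order (-1) 0) []) 0 0

-- ===== PORT B =====
-- dist_matrix[a][b] (the Source B lookup; exact under Pre_, where every lookup is in range)
def pvG (dist_matrix : List (List Int)) (a b : Int) : Int :=
  PySem.List.pyGetD (PySem.List.pyGetD dist_matrix a []) b 0

-- seg(i, j) of Source B: hop distance along route[i..j], splitting the leg at the midpoint.
-- The indices i, j are Nats in range in Source B, so route[i] is List.getD (exact here);
-- the 'j ≤ i' branch is a totality guard only — seg is only ever called with i < j.
def pvSeg (dist_matrix : List (List Int)) (route : List Int) (i j : Nat) : Int :=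
  if j - i = 1 then pvG dist_matrix (route.getD i 0) (route.getD j 0)
  else if j ≤ i then 0
  else pvSeg dist_matrix route i ((i + j) / 2) + pvSeg dist_matrix route ((i + j) / 2) j
termination_by j - i
decreasing_by all_goals omega

def route_distance_with_return_alt (order : List Int) (dist_matrix : List (List Int)) : Int :=
  if order = [] then 0
  else
    let route : List Int := 0 :: (order ++ [0])
    pvSeg dist_matrix route 0 (route.length - 1)

-- ===== PRECONDITION & SPEC =====
-- pair (a, b) of the tour is a safe lookup: dist_matrix[a] exists and index b is in range of that row
def pvPairOk (dist_matrix : List (List Int)) (p : Int × Int) : Bool :=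
  match PySem.List.pyGet? dist_matrix p.1 with
  | some row => decide (PySem.Raise.InRange row.length p.2)
  | none => false

-- Pre_: exactly the inputs where A returns (no IndexError): every lookup it performs —
-- the adjacent pairs of the closed tour — is in range (vacuous for empty order).
def Pre_route_distance_with_return (order : List Int) (dist_matrix : List (List Int)) : Prop :=
  order = [] ∨ ((0 :: (order ++ [0])).zip (order ++ [0])).all (pvPairOk dist_matrix) = true
instance (order : List Int) (dist_matrix : List (List Int)) : Decidable (Pre_route_distance_with_return order dist_matrix) := by unfold Pre_route_distance_with_return; infer_instance

def pvWitness_route_distance_with_return : List Int × List (List Int) := ([1], [[0, 5], [7, 0]])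

def Spec_route_distance_with_return (order : List Int) (dist_matrix : List (List Int)) (out : Int) : Prop := out = route_distance_with_return_alt order dist_matrix
instance (order : List Int) (dist_matrix : List (List Int)) (out : Int) : Decidable (Spec_route_distance_with_return order dist_matrix out) := by unfold Spec_route_distance_with_return; infer_instance

-- ===== CLAIM (what is proved, stated in full; the proofs are below) =====
def Claim_equal_route_distance_with_return : Prop := ∀ (order : List Int) (dist_matrix : List (List Int)), Dom_route_distance_with_return order dist_matrix → Pre_route_distance_with_return order dist_matrix → Spec_route_distance_with_return order dist_matrix (route_distance_with_return order dist_matrix)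

-- ===== LEMMAS AND PROOFS =====

-- the hop summand of the tour: f k = dist[route[k]][route[k+1]]
def pvF (dist_matrix : List (List Int)) (route : List Int) (k : Nat) : Int :=
  pvG dist_matrix (route.getD k 0) (route.getD (k + 1) 0)

-- list sum over range equals the Finset sum
theorem pvListSumRange (f : Nat → Int) (n : Nat) :
    ((List.range n).map f).sum = ∑ k ∈ Finset.range n, f k := by
  induction n with
  | zero => simp
  | succ m ih => rw [List.range_succ, Finset.sum_range_succ]; simp [ih]

-- divide-and-conquer correctness: seg(i, j) sums the hops k ∈ [i, j)
theorem pvSeg_sum (dist_matrix : List (List Int)) (route : List Int) :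
    ∀ (n i j : Nat), j - i ≤ n → i < j →
      pvSeg dist_matrix route i j = ∑ k ∈ Finset.Ico i j, pvF dist_matrix route k := by
  intro n
  induction n with
  | zero => intro i j h1 h2; omega
  | succ m ih =>
    intro i j h1 h2
    rw [pvSeg]
    by_cases hb : j - i = 1
    · have hj : j = i + 1 := by omega
      subst hj
      rw [Finset.sum_Ico_eq_sum_range]
      simp [pvF]
    · have h2' : i + 2 ≤ j := by omega
      rw [if_neg hb, if_neg (by omega)]
      have him : i < (i + j) / 2 := by omega
      have hmj : (i + j) / 2 < j := by omega
      rw [ih i ((i + j) / 2) (by omega) him, ih ((i + j) / 2) j (by omega) hmj]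
      exact Finset.sum_Ico_consecutive _ (by omega) (by omega)

-- A's indexed middle loop summand, rewritten through the route list
theorem pvRouteGet (order : List Int) (k : Nat) (hk : k < order.length) :
    ((order ++ [0]) : List Int).getD k 0 = order.getD k 0 := by
  rw [List.getD_eq_getElem?_getD, List.getD_eq_getElem?_getD, List.getElem?_append_left hk]

-- ===== VERDICT (by name: the statement is the Claim_ definition above) =====
theorem route_distance_with_return_spec : Claim_equal_route_distance_with_return := by
  intro order dist_matrix _ _
  unfold Spec_route_distance_with_return route_distance_with_return route_distance_with_return_alt
  cases order with
  | nil => simp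
  | cons x xs =>
    have hne : (x :: xs) ≠ [] := List.cons_ne_nil x xs
    simp only [if_neg hne]
    set n : Nat := (x :: xs).length with hn
    have hn1 : 1 ≤ n := by simp [hn]
    set route : List Int := 0 :: ((x :: xs) ++ [0]) with hroute
    have hlen : route.length - 1 = n + 1 := by simp [hroute, hn]
    -- B side: seg(0, n+1) = ∑ k ∈ [0, n+1), f k
    rw [hlen, pvSeg_sum dist_matrix route (n + 1) 0 (n + 1) (by omega) (by omega)]
    -- A side: convert the pyRange fold to a Nat-range fold, then to a sum
    have hr : PySem.List.pyRange 0 (((x :: xs).length : Int) - 1) 1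
        = (List.range (n - 1)).map (Nat.cast : Nat → Int) := by
      rw [PySem.List.pyRange_one]
      have h2 : ((((x :: xs).length : Int) - 1) - 0).toNat = n - 1 := by
        simp only [← hn]; omega
      rw [h2]
      exact List.map_congr_left (fun k _ => by simp)
    rw [hr, List.foldl_map]
    have hfun : (fun (t : Int) (k : Nat) => t + PySem.List.pyGetD (PySem.List.pyGetD dist_matrix (PySem.List.pyGetD (x :: xs) (Nat.cast k : Int) 0) []) (PySem.List.pyGetD (x :: xs) ((Nat.cast k : Int) + 1) 0) 0)
        = (fun (t : Int) (k : Nat) => t + pvG dist_matrix ((x :: xs).getD k 0) ((x :: xs).getD (k + 1) 0)) := by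
      funext t k
      have h1 : ((Nat.cast k : Int) + 1) = ((k + 1 : Nat) : Int) := by push_cast; ring
      rw [h1, PySem.List.pyGetD_natCast, PySem.List.pyGetD_natCast]
      rfl
    rw [hfun, PySem.List.foldl_add, pvListSumRange]
    rw [PySem.List.pyGetD_zero_cons, PySem.List.pyGetD_neg_one (x :: xs) 0 hne]
    -- assemble: peel the first and last hop off the Ico sum
    have hIco : (Finset.Ico 0 (n + 1)) = Finset.range (n + 1) := by
      rw [Finset.range_eq_Ico]
    rw [hIco, Finset.sum_range_succ']
    -- n = (n-1)+1 to peel the last middle-sum term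
    have hsplit : ∑ k ∈ Finset.range n, pvF dist_matrix route (k + 1)
        = (∑ k ∈ Finset.range (n - 1), pvF dist_matrix route (k + 1)) + pvF dist_matrix route n := by
      have : n = (n - 1) + 1 := by omega
      rw [this, Finset.sum_range_succ, ← this]
    rw [hsplit]
    -- identify the three pieces pointwise
    have hf0 : pvF dist_matrix route 0 = pvG dist_matrix 0 x := by
      simp [pvF, hroute]
    have hfmid : ∀ k ∈ Finset.range (n - 1),
        pvF dist_matrix route (k + 1) = pvG dist_matrix ((x :: xs).getD k 0) ((x :: xs).getD (k + 1) 0) := by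
      intro k hk
      rw [Finset.mem_range] at hk
      have hk1 : k < (x :: xs).length := by omega
      have hk2 : k + 1 < (x :: xs).length := by rw [← hn]; omega
      simp only [pvF, hroute, List.getD_cons_succ]
      rw [pvRouteGet _ k hk1, pvRouteGet _ (k + 1) hk2, List.getD_cons_succ]
    have hflast : pvF dist_matrix route n = pvG dist_matrix ((x :: xs).getLast hne) 0 := by
      obtain ⟨m, hm⟩ : ∃ m, n = m + 1 := ⟨n - 1, by omega⟩
      simp only [pvF, hroute, hm, List.getD_cons_succ]
      have h1 : ((x :: xs) ++ [0]).getD m 0 = (x :: xs).getLast hne := by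
        rw [pvRouteGet _ m (by omega), List.getLast_eq_getElem,
          List.getD_eq_getElem _ _ (by omega)]
        congr 1
        omega
      have h2 : ((x :: xs) ++ [0]).getD (m + 1) 0 = 0 := by
        rw [List.getD_eq_getElem?_getD, List.getElem?_append_right (by omega)]
        have hz : m + 1 - (x :: xs).length = 0 := by omega
        rw [hz]
        simp
      rw [h1, h2]
    rw [Finset.sum_congr rfl hfmid, hf0, hflast]
    simp only [pvG]
    ring
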